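-- pv_equiv track=rewrite | github.com/MrBrantCode/unitest_baseline | mut_generate/mist_train_taco/taco_2834/solution.py | count_valid_ipv4_delimiters
-- ===== SOURCE A (Python) =====
-- def count_valid_ipv4_delimiters(s: str) -> int:
--     def check(num: str) -> bool:
--         if num == '':
--             return False
--         if num[0] == '0':
--             return num == '0'
--         return 0 <= int(num) <= 255
--
--     ans = 0
--     for i in range(1, 4):
--         for j in range(1, 4):
--             for k in range(1, 4):
--                 n1 = s[:i]
--                 n2 = s[i:i + j]
--                 n3 = s[i + j:i + j + k]
--                 n4 = s[i + j + k:]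
--                 if check(n1) and check(n2) and check(n3) and check(n4):
--                     ans += 1
--     return ans
-- ===== SOURCE B (Python) =====
-- def count_valid_ipv4_delimiters(s: str) -> int:
--     def check(num: str) -> bool:
--         if num == '':
--             return False
--         if num[0] == '0':
--             return num == '0'
--         return 0 <= int(num) <= 255
--
--     def rec(start: int, parts: int) -> int:
--         if parts == 1:
--             return 1 if check(s[start:]) else 0
--         total = 0
--         for L in (1, 2, 3):
--             if check(s[start:start + L]):
--                 total += rec(start + L, parts - 1)
--         return total
--
--     return rec(0, 4)
-- ===== Notes on version B (the rewrite author's own statement) =====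
-- stated objective: alternative
-- what changed: Replaces A's hard-coded triple nested loop over the three cut widths with a recursive helper rec(start, parts) that counts ways to fill the remaining segments from s[start:], pruning a branch as soon as one segment fails instead of re-testing shared prefixes 27 times.
import Mathlib
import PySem

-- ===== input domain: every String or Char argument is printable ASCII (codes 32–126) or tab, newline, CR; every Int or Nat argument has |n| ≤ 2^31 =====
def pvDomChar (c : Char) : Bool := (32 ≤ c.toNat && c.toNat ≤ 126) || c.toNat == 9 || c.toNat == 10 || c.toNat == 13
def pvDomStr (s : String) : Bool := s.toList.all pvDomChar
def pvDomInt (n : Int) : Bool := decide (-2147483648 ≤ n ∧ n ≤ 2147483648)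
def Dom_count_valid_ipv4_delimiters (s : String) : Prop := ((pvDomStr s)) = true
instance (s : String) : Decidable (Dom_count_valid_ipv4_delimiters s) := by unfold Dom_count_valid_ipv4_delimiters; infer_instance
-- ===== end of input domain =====

-- B replaces A's hard-coded triple loop over the cut widths with a recursive helper counting
-- the ways to fill the remaining segments (alternative decomposition, not claimed faster).


-- ===== PORT A =====
-- check(num): '' is False; a leading '0' only allows "0"; otherwise 0 <= int(num) <= 255.
-- int(num) -> PySem.Int.ofStr?; its 'none' is Python's ValueError, excluded by Pre_ below,
-- so mapping none to false here is never exercised inside Pre_.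
def checkA (num : String) : Bool :=
  if num = "" then false
  else if PySem.Str.pyGet? num 0 = some '0' then num = "0"
  else match PySem.Int.ofStr? num with
       | some v => decide (0 ≤ v ∧ v ≤ 255)
       | none => false

def count_valid_ipv4_delimiters (s : String) : Int :=
  (PySem.List.pyRange 1 4 1).foldl (fun ans i =>
    (PySem.List.pyRange 1 4 1).foldl (fun ans j =>
      (PySem.List.pyRange 1 4 1).foldl (fun ans k =>
        let n1 := PySem.Str.slice s none (some i)
        let n2 := PySem.Str.slice s (some i) (some (i + j))
        let n3 := PySem.Str.slice s (some (i + j)) (some (i + j + k))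
        let n4 := PySem.Str.slice s (some (i + j + k)) none
        if checkA n1 && (checkA n2 && (checkA n3 && checkA n4)) then ans + 1 else ans)
      ans) ans) 0

-- ===== PORT B =====
-- Source B keeps the check helper identical to A's
def checkB (num : String) : Bool :=
  if num = "" then false
  else if PySem.Str.pyGet? num 0 = some '0' then num = "0"
  else match PySem.Int.ofStr? num with
       | some v => decide (0 ≤ v ∧ v ≤ 255)
       | none => false

-- rec(start, parts): parts counts down 4,3,2,1; Python's rec would diverge for parts ≤ 0 but is
-- never called with parts < 1, so the Nat pattern 0 returns 0 as an unreachable default.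
def recB (s : String) (start : Int) : Nat → Int
  | 0 => 0
  | 1 => if checkB (PySem.Str.slice s (some start) none) then 1 else 0
  | (m + 2) =>
    [1, 2, 3].foldl (fun total L =>
      if checkB (PySem.Str.slice s (some start) (some (start + L))) then
        total + recB s (start + L) (m + 1)
      else total) 0

def count_valid_ipv4_delimiters_alt (s : String) : Int := recB s 0 4

-- ===== PRECONDITION & SPEC =====
-- a segment passes the IPv4 rules: nonempty, leading '0' only as "0", otherwise an int in 0..255
def pvSegOk (t : String) : Bool :=
  if t = "" then false
  else if PySem.Str.pyGet? t 0 = some '0' then t = "0"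
  else match PySem.Int.ofStr? t with
       | some v => decide (0 ≤ v ∧ v ≤ 255) | none => false
-- a segment can be tested without int() raising ValueError: empty, leading '0', or parseable
def pvSegNoRaise (t : String) : Bool :=
  t = "" || PySem.Str.pyGet? t 0 == some '0' || (PySem.Int.ofStr? t).isSome

-- Pre_ excludes EXACTLY the inputs on which A raises ValueError (a reached check calls int()
-- on a nonempty, non-'0'-leading, non-parseable segment); on every input A returns, Pre_ holds.
-- The reached segments are the three prefixes s[:i] plus, below each passing segment, the three
-- next cuts and (after three passing segments) the final tail.  B raises the same way there.
def Pre_count_valid_ipv4_delimiters (s : String) : Prop :=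
  ([1, 2, 3].all fun (i : Int) =>
    pvSegNoRaise (PySem.Str.slice s none (some i)) &&
    (!pvSegOk (PySem.Str.slice s none (some i)) ||
      [1, 2, 3].all fun (j : Int) =>
        pvSegNoRaise (PySem.Str.slice s (some i) (some (i + j))) &&
        (!pvSegOk (PySem.Str.slice s (some i) (some (i + j))) ||
          [1, 2, 3].all fun (k : Int) =>
            pvSegNoRaise (PySem.Str.slice s (some (i + j)) (some (i + j + k))) &&
            (!pvSegOk (PySem.Str.slice s (some (i + j)) (some (i + j + k))) ||
              pvSegNoRaise (PySem.Str.slice s (some (i + j + k)) none))))) = true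
instance (s : String) : Decidable (Pre_count_valid_ipv4_delimiters s) := by unfold Pre_count_valid_ipv4_delimiters; infer_instance
def pvWitness_count_valid_ipv4_delimiters : String := "25525511135"

def Spec_count_valid_ipv4_delimiters (s : String) (out : Int) : Prop := out = count_valid_ipv4_delimiters_alt s
instance (s : String) (out : Int) : Decidable (Spec_count_valid_ipv4_delimiters s out) := by unfold Spec_count_valid_ipv4_delimiters; infer_instance

-- ===== CLAIM (what is proved, stated in full; the proofs are below) =====
def Claim_equal_count_valid_ipv4_delimiters : Prop := ∀ (s : String), Dom_count_valid_ipv4_delimiters s → Pre_count_valid_ipv4_delimiters s → Spec_count_valid_ipv4_delimiters s (count_valid_ipv4_delimiters s)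

-- ===== LEMMAS AND PROOFS =====
theorem checkB_eq (t : String) : checkB t = checkA t := rfl

def ind (c : Bool) : Int := if c then 1 else 0

-- the common 27-term normal form both ports are reduced to
def body (s : String) (i j k : Int) : Int :=
  ind (checkA (PySem.Str.slice s none (some i)) &&
       (checkA (PySem.Str.slice s (some i) (some (i + j))) &&
        (checkA (PySem.Str.slice s (some (i + j)) (some (i + j + k))) &&
         checkA (PySem.Str.slice s (some (i + j + k)) none))))
def g2 (s : String) (i j : Int) : Int := body s i j 1 + (body s i j 2 + body s i j 3)
def g1 (s : String) (i : Int) : Int := g2 s i 1 + (g2 s i 2 + g2 s i 3)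
def rhs (s : String) : Int := g1 s 1 + (g1 s 2 + g1 s 3)

-- B's intermediate normal forms (levels 2 and 3, start generalized)
def bTwo (s : String) (p : Int) : Int :=
  ind (checkA (PySem.Str.slice s (some p) (some (p + 1))) && checkA (PySem.Str.slice s (some (p + 1)) none)) +
  (ind (checkA (PySem.Str.slice s (some p) (some (p + 2))) && checkA (PySem.Str.slice s (some (p + 2)) none)) +
   ind (checkA (PySem.Str.slice s (some p) (some (p + 3))) && checkA (PySem.Str.slice s (some (p + 3)) none)))
def bThreeInner (s : String) (p j : Int) : Int :=
  ind (checkA (PySem.Str.slice s (some p) (some (p + j))) &&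
       (checkA (PySem.Str.slice s (some (p + j)) (some (p + j + 1))) && checkA (PySem.Str.slice s (some (p + j + 1)) none))) +
  (ind (checkA (PySem.Str.slice s (some p) (some (p + j))) &&
        (checkA (PySem.Str.slice s (some (p + j)) (some (p + j + 2))) && checkA (PySem.Str.slice s (some (p + j + 2)) none))) +
   ind (checkA (PySem.Str.slice s (some p) (some (p + j))) &&
        (checkA (PySem.Str.slice s (some (p + j)) (some (p + j + 3))) && checkA (PySem.Str.slice s (some (p + j + 3)) none))))
def bThree (s : String) (p : Int) : Int := bThreeInner s p 1 + (bThreeInner s p 2 + bThreeInner s p 3)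

theorem sum3 (F : Int → Int → Int) (f : Int → Int) (h : ∀ a x, F a x = a + f x) (acc : Int) :
    List.foldl F acc [1, 2, 3] = acc + (f 1 + (f 2 + f 3)) := by
  simp [List.foldl, h, add_assoc]

theorem ind_one (c : Bool) (a : Int) : (if c then a + 1 else a) = a + ind c := by
  cases c <;> simp [ind]

theorem ite_acc (c : Bool) (a x : Int) : (if c then a + x else a) = a + (if c then x else 0) := by
  cases c <;> simp

theorem ite_ind (a b : Bool) : (if a then ind b else 0) = ind (a && b) := by
  cases a <;> simp [ind]

theorem ite_sum3 (c : Bool) (x y z : Int) :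
    (if c then x + (y + z) else 0) = (if c then x else 0) + ((if c then y else 0) + (if c then z else 0)) := by
  cases c <;> simp

theorem str_slice_zero (s : String) (b : Option Int) :
    PySem.Str.slice s (some 0) b = PySem.Str.slice s none b := by
  simp [PySem.Str.slice]

theorem recB_two (s : String) (p : Int) : recB s p 2 = bTwo s p := by
  have e : recB s p 2 = List.foldl (fun total L =>
      if checkB (PySem.Str.slice s (some p) (some (p + L))) then total + recB s (p + L) 1
      else total) 0 [1, 2, 3] := rfl
  rw [e, sum3 _ (fun L => if checkB (PySem.Str.slice s (some p) (some (p + L))) then recB s (p + L) 1 else 0)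
        (fun a L => ite_acc _ a _) 0]
  have b1 : ∀ q : Int, recB s q 1 = ind (checkB (PySem.Str.slice s (some q) none)) := fun _ => rfl
  simp only [b1, ite_ind, checkB_eq, zero_add]
  rfl

theorem recB_three (s : String) (p : Int) : recB s p 3 = bThree s p := by
  have e : recB s p 3 = List.foldl (fun total L =>
      if checkB (PySem.Str.slice s (some p) (some (p + L))) then total + recB s (p + L) 2
      else total) 0 [1, 2, 3] := rfl
  rw [e, sum3 _ (fun L => if checkB (PySem.Str.slice s (some p) (some (p + L))) then recB s (p + L) 2 else 0)
        (fun a L => ite_acc _ a _) 0]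
  simp only [recB_two, bTwo, ite_sum3, ite_ind, checkB_eq, zero_add]
  rfl

theorem alt_rhs (s : String) : count_valid_ipv4_delimiters_alt s = rhs s := by
  have e : count_valid_ipv4_delimiters_alt s = List.foldl (fun total L =>
      if checkB (PySem.Str.slice s (some 0) (some (0 + L))) then total + recB s (0 + L) 3
      else total) 0 [1, 2, 3] := rfl
  rw [e, sum3 _ (fun L => if checkB (PySem.Str.slice s (some 0) (some (0 + L))) then recB s (0 + L) 3 else 0)
        (fun a L => ite_acc _ a _) 0]
  simp only [recB_three, bThree, bThreeInner, ite_sum3, ite_ind, checkB_eq, str_slice_zero, zero_add]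
  rfl

theorem a_rhs (s : String) : count_valid_ipv4_delimiters s = rhs s := by
  have hr : PySem.List.pyRange 1 4 1 = [1, 2, 3] := by decide
  simp only [count_valid_ipv4_delimiters, hr]
  have h : List.foldl (fun ans i =>
      List.foldl (fun ans j =>
        List.foldl (fun ans k =>
          let n1 := PySem.Str.slice s none (some i)
          let n2 := PySem.Str.slice s (some i) (some (i + j))
          let n3 := PySem.Str.slice s (some (i + j)) (some (i + j + k))
          let n4 := PySem.Str.slice s (some (i + j + k)) none
          if checkA n1 && (checkA n2 && (checkA n3 && checkA n4)) then ans + 1 else ans)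
        ans [1, 2, 3]) ans [1, 2, 3]) 0 [1, 2, 3] = 0 + rhs s := by
    exact sum3 _ (fun i => g1 s i)
      (fun a i => sum3 _ (fun j => g2 s i j)
        (fun a j => sum3 _ (fun k => body s i j k)
          (fun a k => ind_one _ a) a) a) 0
  rw [h, zero_add]

-- ===== VERDICT (by name: the statement is the Claim_ definition above) =====
theorem count_valid_ipv4_delimiters_spec : Claim_equal_count_valid_ipv4_delimiters := by
  intro s _ _
  show count_valid_ipv4_delimiters s = count_valid_ipv4_delimiters_alt s
  rw [a_rhs, alt_rhs]
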